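-- pv_equiv track=rewrite | github.com/aravindgopall/commit | main.py | parse_alternate_response
-- ===== SOURCE A (Python) =====
-- def parse_alternate_response(response: str):
--     """
--     Parses the structured response from LLM into a dictionary of categories and their intents.
--
--     Example response:
--     Category: Transaction Handling
--     Intents:
--     - add handling for verify.nb parameter types in transaction processing
--     - add pre-transaction validation logic
--
--     Returns a dictionary of categories with intents.
--     """
--     categories = {}
--     current_category = None
--     current_intents = []
--
--
--     lines = response.split('\n')
--
--     for line in lines:
--         line = line.strip()  # Clean up whitespace
--
--         if line.startswith("Category:"):
--
--             if current_category:
--                 categories[current_category] = current_intents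
--
--
--             current_category = line[len("Category:"):].strip()
--             current_intents = []
--
--         elif line.startswith("-"):
--
--             current_intents.append(line[len("-"):].strip())
--
--
--     if current_category:
--         categories[current_category] = current_intents
--
--     return categories
-- ===== SOURCE B (Python) =====
-- def parse_alternate_response(response: str):
--     """Recursive-descent decomposition: segment the lines into (name, intents)
--     blocks first, then build the dict from the segments."""
--     def collect(ls):
--         # gather '-' intents until the next 'Category:' header; return (intents, rest)
--         i = 0
--         intents = []
--         while i < len(ls):
--             s = ls[i].strip()
--             if s.startswith("Category:"):
--                 break
--             if s.startswith("-"):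
--                 intents.append(s[1:].strip())
--             i += 1
--         return intents, ls[i:]
--
--     _, rest = collect(response.split('\n'))  # lines before the first header are dropped
--     segments = []
--     while rest:
--         name = rest[0].strip()[len("Category:"):].strip()
--         intents, rest = collect(rest[1:])
--         segments.append((name, intents))
--
--     result = {}
--     for name, intents in segments:
--         if name:  # a header with an empty name contributes nothing
--             result[name] = intents
--     return result
-- ===== Notes on version B (the rewrite author's own statement) =====
-- stated objective: alternative
-- what changed: Replaced A's single stateful line loop (dict + current_category + current_intents mutated per line) with a recursive-descent decomposition: a collector that splits the lines into (category-name, intent-block) segments, then a separate pass that builds the dict from the segments.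
import Mathlib
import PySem

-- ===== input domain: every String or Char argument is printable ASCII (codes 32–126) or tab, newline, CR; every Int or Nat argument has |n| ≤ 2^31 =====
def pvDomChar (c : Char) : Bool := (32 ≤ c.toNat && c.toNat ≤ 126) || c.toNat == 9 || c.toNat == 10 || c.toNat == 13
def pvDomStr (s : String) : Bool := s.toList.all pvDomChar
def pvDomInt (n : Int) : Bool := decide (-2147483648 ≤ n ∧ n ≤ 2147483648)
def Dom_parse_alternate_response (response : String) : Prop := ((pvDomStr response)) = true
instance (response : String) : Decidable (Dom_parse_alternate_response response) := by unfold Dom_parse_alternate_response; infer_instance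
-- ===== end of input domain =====

-- B re-decomposes A's single stateful line loop into a recursive-descent segmenter
-- (blocks of intents between headers) followed by a separate dict-building pass; objective: alternative.

-- ===== PORT A =====
-- A's loop state: (categories dict, current_category, current_intents).
-- `if current_category:` is Python truthiness: None and "" are both falsy.
def pvFinishA (st : PySem.Dict String (List String) × Option String × List String) :
    PySem.Dict String (List String) :=
  match st with
  | (d, some c, ci) => if c ≠ "" then d.insert c ci else d
  | (d, none, _) => d

def pvStepA (st : PySem.Dict String (List String) × Option String × List String)
    (line : String) : PySem.Dict String (List String) × Option String × List String :=
  let line := PySem.Str.strip line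
  if PySem.Str.startswith line "Category:" then
    (pvFinishA st, some (PySem.Str.strip (PySem.Str.slice line (some 9) none)), [])
  else if PySem.Str.startswith line "-" then
    (st.1, st.2.1, st.2.2 ++ [PySem.Str.strip (PySem.Str.slice line (some 1) none)])
  else st

def parse_alternate_response (response : String) : List (String × List String) :=
  (pvFinishA (((PySem.Str.split? response "\n").getD []).foldl pvStepA
    (PySem.Dict.empty, none, []))).items

-- ===== PORT B =====
-- collect: gather '-' intents until the next 'Category:' header; return (intents, rest).
def pvCollectB : List String → List String × List String
  | [] => ([], [])
  | l :: t =>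
    let s := PySem.Str.strip l
    if PySem.Str.startswith s "Category:" then ([], l :: t)
    else
      let r := pvCollectB t
      (if PySem.Str.startswith s "-" then
          PySem.Str.strip (PySem.Str.slice s (some 1) none) :: r.1
        else r.1, r.2)

theorem pvCollectB_len (ls : List String) : (pvCollectB ls).2.length ≤ ls.length := by
  induction ls with
  | nil => simp [pvCollectB]
  | cons l t ih =>
    simp only [pvCollectB]
    split
    · simp
    · simpa using Nat.le_succ_of_le ih

-- segments: rest starts at a header; take its name and its block, recurse on the remainder.
def pvSegmentsB : List String → List (String × List String)
  | [] => []
  | h :: t =>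
    let name := PySem.Str.strip (PySem.Str.slice (PySem.Str.strip h) (some 9) none)
    (name, (pvCollectB t).1) :: pvSegmentsB (pvCollectB t).2
termination_by ls => ls.length
decreasing_by exact Nat.lt_succ_of_le (pvCollectB_len t)

def pvAssignB (d : PySem.Dict String (List String)) (seg : String × List String) :
    PySem.Dict String (List String) :=
  if seg.1 ≠ "" then d.insert seg.1 seg.2 else d

def parse_alternate_response_alt (response : String) : List (String × List String) :=
  ((pvSegmentsB (pvCollectB ((PySem.Str.split? response "\n").getD [])).2).foldl
    pvAssignB PySem.Dict.empty).items

-- ===== PRECONDITION & SPEC =====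
def Spec_parse_alternate_response (response : String) (out : List (String × List String)) : Prop := out = parse_alternate_response_alt response
instance (response : String) (out : List (String × List String)) : Decidable (Spec_parse_alternate_response response out) := by unfold Spec_parse_alternate_response; infer_instance

-- ===== CLAIM (what is proved, stated in full; the proofs are below) =====
def Claim_equal_parse_alternate_response : Prop := ∀ (response : String), Dom_parse_alternate_response response → Spec_parse_alternate_response response (parse_alternate_response response)

-- ===== LEMMAS AND PROOFS =====

-- A's fold over the non-header prefix only accumulates collect's intents.
theorem pvFold_collect (ls : List String) (d : PySem.Dict String (List String))
    (cc : Option String) (ci : List String) :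
    ls.foldl pvStepA (d, cc, ci)
      = (pvCollectB ls).2.foldl pvStepA (d, cc, ci ++ (pvCollectB ls).1) := by
  induction ls generalizing ci with
  | nil => simp [pvCollectB]
  | cons l t ih =>
    simp only [pvCollectB]
    by_cases h : PySem.Str.startswith (PySem.Str.strip l) "Category:" = true
    · rw [if_pos h]
      simp
    · rw [if_neg h]
      by_cases hd : PySem.Str.startswith (PySem.Str.strip l) "-" = true
      · have hstep : pvStepA (d, cc, ci) l
            = (d, cc, ci ++ [PySem.Str.strip (PySem.Str.slice (PySem.Str.strip l) (some 1) none)]) := by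
          simp only [pvStepA]
          rw [if_neg h, if_pos hd]
        rw [List.foldl_cons, hstep, ih, if_pos hd]
        simp
      · have hstep : pvStepA (d, cc, ci) l = (d, cc, ci) := by
          simp only [pvStepA]
          rw [if_neg h, if_neg hd]
        rw [List.foldl_cons, hstep, ih, if_neg hd]

-- collect stops exactly at a header line.
theorem pvCollect_rest_header (ls : List String) (h : String) (t : List String)
    (hh : (pvCollectB ls).2 = h :: t) :
    PySem.Str.startswith (PySem.Str.strip h) "Category:" = true := by
  induction ls with
  | nil => simp [pvCollectB] at hh
  | cons l t' ih =>
    rw [pvCollectB] at hh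
    by_cases hc : PySem.Str.startswith (PySem.Str.strip l) "Category:" = true
    · rw [if_pos hc] at hh
      have h1 : l = h := (List.cons.injEq ..).mp hh |>.1
      rw [← h1]; exact hc
    · rw [if_neg hc] at hh
      exact ih hh

-- Main invariant: finishing A's fold equals assigning B's segments on top of the finished state.
theorem pvMain (n : Nat) : ∀ (ls : List String), ls.length ≤ n →
    ∀ (d : PySem.Dict String (List String)) (cc : Option String) (ci : List String),
    pvFinishA (ls.foldl pvStepA (d, cc, ci))
      = (pvSegmentsB (pvCollectB ls).2).foldl pvAssignB
          (pvFinishA (d, cc, ci ++ (pvCollectB ls).1)) := by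
  induction n with
  | zero =>
    intro ls hls d cc ci
    have : ls = [] := List.length_eq_zero_iff.mp (Nat.le_zero.mp hls)
    subst this
    simp [pvCollectB, pvSegmentsB]
  | succ n ih =>
    intro ls hls d cc ci
    rw [pvFold_collect]
    cases hrest : (pvCollectB ls).2 with
    | nil => simp [pvSegmentsB]
    | cons h t =>
      have hhdr := pvCollect_rest_header ls h t hrest
      have hstep : pvStepA (d, cc, ci ++ (pvCollectB ls).1) h
          = (pvFinishA (d, cc, ci ++ (pvCollectB ls).1),
             some (PySem.Str.strip (PySem.Str.slice (PySem.Str.strip h) (some 9) none)), []) := by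
        simp only [pvStepA]
        rw [if_pos hhdr]
      have hlen : t.length ≤ n := by
        have h1 : (pvCollectB ls).2.length ≤ ls.length := pvCollectB_len ls
        rw [hrest] at h1
        simp at h1
        omega
      rw [List.foldl_cons, hstep, ih t hlen]
      simp only [pvSegmentsB, List.foldl_cons]
      congr 1

-- ===== VERDICT (by name: the statement is the Claim_ definition above) =====
theorem parse_alternate_response_spec : Claim_equal_parse_alternate_response := by
  intro response _
  unfold Spec_parse_alternate_response parse_alternate_response parse_alternate_response_alt
  rw [pvMain ((PySem.Str.split? response "\n").getD []).length
    ((PySem.Str.split? response "\n").getD []) (le_refl _) PySem.Dict.empty none []]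
  simp [pvFinishA]
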